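-- pv_equiv track=rewrite | github.com/DouglasMTrindade/Estudo-Python | Exercicios-CursoEmVideo/ex-087.py | analisa_matriz
-- ===== SOURCE A (Python) =====
-- def analisa_matriz (matriz):
--     """
--     verifica a matriz gerada pelo usuario
--
--     Retorna:
--         -Soma dos valores pares
--         -Soma da terceira coluna
--         -Soma da segunda linha
--         -largura para formatação de exibicao da matriz
--     """
--
--     soma_par = 0
--     maior_valor = 0
--     soma_coluna3 = 0
--     soma_linha2 = 0
--     for linha in matriz:
--         for valor in linha:
--             if valor%2 ==0:
--                 soma_par += valor
--             if valor > maior_valor: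
--                 maior_valor = valor
--
--         if len(linha) >= 3:
--             soma_coluna3 += linha[2]
--     soma_linha2 = sum(matriz[1])
--     largura = len(str(maior_valor))
--
--     return soma_par,largura, soma_coluna3, soma_linha2
-- ===== SOURCE B (Python) =====
-- def _row(vals):
--     # divide-and-conquer over one row: (even-sum, max of values floored at 0)
--     n = len(vals)
--     if n == 0:
--         return (0, 0)
--     if n == 1:
--         v = vals[0]
--         return (v if v % 2 == 0 else 0, v if v > 0 else 0)
--     m = n // 2
--     sl, ml = _row(vals[:m])
--     sr, mr = _row(vals[m:])
--     return (sl + sr, ml if ml >= mr else mr)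
--
--
-- def _agg(rows):
--     # divide-and-conquer over the rows: (even-sum, floored max, column-3 sum)
--     n = len(rows)
--     if n == 0:
--         return (0, 0, 0)
--     if n == 1:
--         r = rows[0]
--         sp, mv = _row(r)
--         return (sp, mv, r[2] if len(r) >= 3 else 0)
--     m = n // 2
--     s1, m1, c1 = _agg(rows[:m])
--     s2, m2, c2 = _agg(rows[m:])
--     return (s1 + s2, m1 if m1 >= m2 else m2, c1 + c2)
--
--
-- def analisa_matriz(matriz):
--     sp, mv, c3 = _agg(matriz)
--     return sp, len(str(mv)), c3, sum(matriz[1])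
-- ===== Notes on version B (the rewrite author's own statement) =====
-- stated objective: alternative
-- what changed: A's fused left-to-right double loop threading mutable accumulators is replaced by a divide-and-conquer aggregation: the matrix (and each row) is split in halves, each half is aggregated recursively, and the (even-sum, floored max, column-3 sum) triples are merged; correctness rests on associativity/commutativity of + and max.
import Mathlib
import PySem

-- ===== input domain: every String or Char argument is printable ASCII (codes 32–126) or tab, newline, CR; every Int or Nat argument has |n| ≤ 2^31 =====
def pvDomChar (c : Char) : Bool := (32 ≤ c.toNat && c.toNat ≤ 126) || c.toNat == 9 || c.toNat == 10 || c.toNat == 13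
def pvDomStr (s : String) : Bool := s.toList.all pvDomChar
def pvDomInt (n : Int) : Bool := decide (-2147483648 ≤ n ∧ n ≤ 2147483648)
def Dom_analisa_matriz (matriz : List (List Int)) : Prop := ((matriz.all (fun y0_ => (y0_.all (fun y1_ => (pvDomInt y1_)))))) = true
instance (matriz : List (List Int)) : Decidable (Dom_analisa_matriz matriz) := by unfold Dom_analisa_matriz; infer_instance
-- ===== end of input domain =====

-- B replaces A's fused double loop by a divide-and-conquer aggregation (objective: alternative); return value only.


-- ===== PORT A =====
-- fused double loop carrying (soma_par, maior_valor, soma_coluna3)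
def analisa_matriz (matriz : List (List Int)) : Int × Int × Int × Int :=
  let st := matriz.foldl (fun (st : Int × Int × Int) linha =>
      let st2 := linha.foldl (fun (s : Int × Int) valor =>
          (if PySem.Int.mod valor 2 = 0 then s.1 + valor else s.1,
           if valor > s.2 then valor else s.2)) (st.1, st.2.1)
      (st2.1, st2.2,
       if (3 : Int) ≤ (linha.length : Int) then st.2.2 + ((PySem.List.pyGet? linha 2).getD 0) else st.2.2))
    (0, 0, 0)
  let soma_linha2 := ((PySem.List.pyGet? matriz 1).getD []).foldl (· + ·) 0
  let largura : Int := (PySem.Str.len (PySem.Int.toStr st.2.1) : Int)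
  (st.1, largura, st.2.2, soma_linha2)

-- ===== PORT B =====
-- divide-and-conquer over one row: (even-sum, max of values floored at 0)
def pvRowDC (vals : List Int) : Int × Int :=
  match vals with
  | [] => (0, 0)
  | [v] => (if PySem.Int.mod v 2 = 0 then v else 0, if v > 0 then v else 0)
  | v₁ :: v₂ :: rest =>
    let l := v₁ :: v₂ :: rest
    let m := l.length / 2
    let x := pvRowDC (l.take m)
    let y := pvRowDC (l.drop m)
    (x.1 + y.1, if x.2 ≥ y.2 then x.2 else y.2)
termination_by vals.length
decreasing_by
  · simp [List.length_take]; omega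
  · simp [List.length_drop]; omega

-- divide-and-conquer over the rows: (even-sum, floored max, column-3 sum)
def pvAggDC (rows : List (List Int)) : Int × Int × Int :=
  match rows with
  | [] => (0, 0, 0)
  | [r] =>
    let x := pvRowDC r
    (x.1, x.2, if (3 : Int) ≤ (r.length : Int) then (PySem.List.pyGet? r 2).getD 0 else 0)
  | r₁ :: r₂ :: rest =>
    let l := r₁ :: r₂ :: rest
    let m := l.length / 2
    let x := pvAggDC (l.take m)
    let y := pvAggDC (l.drop m)
    (x.1 + y.1, if x.2.1 ≥ y.2.1 then x.2.1 else y.2.1, x.2.2 + y.2.2)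
termination_by rows.length
decreasing_by
  · simp [List.length_take]; omega
  · simp [List.length_drop]; omega

def analisa_matriz_alt (matriz : List (List Int)) : Int × Int × Int × Int :=
  let st := pvAggDC matriz
  let soma_linha2 := ((PySem.List.pyGet? matriz 1).getD []).foldl (· + ·) 0
  (st.1, (PySem.Str.len (PySem.Int.toStr st.2.1) : Int), st.2.2, soma_linha2)

-- ===== PRECONDITION & SPEC =====
-- Pre_ excludes matrices with fewer than 2 rows, on which A raises IndexError at matriz[1] (B raises there too).
def Pre_analisa_matriz (matriz : List (List Int)) : Prop := 2 ≤ matriz.length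
instance (matriz : List (List Int)) : Decidable (Pre_analisa_matriz matriz) := by unfold Pre_analisa_matriz; infer_instance
def pvWitness_analisa_matriz : List (List Int) := [[1, 2, 3], [4, 5, 6]]
def Spec_analisa_matriz (matriz : List (List Int)) (out : Int × Int × Int × Int) : Prop := out = analisa_matriz_alt matriz
instance (matriz : List (List Int)) (out : Int × Int × Int × Int) : Decidable (Spec_analisa_matriz matriz out) := by unfold Spec_analisa_matriz; infer_instance

-- ===== CLAIM (what is proved, stated in full; the proofs are below) =====
def Claim_equal_analisa_matriz : Prop := ∀ (matriz : List (List Int)), Dom_analisa_matriz matriz → Pre_analisa_matriz matriz → Spec_analisa_matriz matriz (analisa_matriz matriz)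

-- ===== LEMMAS AND PROOFS =====

-- canonical linear characterisations (proof-only)
def pvEvenSum (l : List Int) : Int := l.foldr (fun v s => if PySem.Int.mod v 2 = 0 then v + s else s) 0
def pvMaxF (l : List Int) : Int := l.foldr (fun v m => max (max v 0) m) 0
def pvRowsES (rows : List (List Int)) : Int := rows.foldr (fun r s => pvEvenSum r + s) 0
def pvRowsMF (rows : List (List Int)) : Int := rows.foldr (fun r m => max (pvMaxF r) m) 0
def pvCol3 (rows : List (List Int)) : Int :=
  rows.foldr (fun r c => (if (3 : Int) ≤ (r.length : Int) then (PySem.List.pyGet? r 2).getD 0 else 0) + c) 0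

theorem pvMaxF_nonneg (l : List Int) : 0 ≤ pvMaxF l := by
  induction l with
  | nil => simp [pvMaxF]
  | cons v r ih => simp only [pvMaxF, List.foldr_cons] at *; exact le_max_of_le_right ih

theorem pvRowsMF_nonneg (rows : List (List Int)) : 0 ≤ pvRowsMF rows := by
  induction rows with
  | nil => simp [pvRowsMF]
  | cons r rs ih => simp only [pvRowsMF, List.foldr_cons] at *; exact le_max_of_le_right ih

theorem pvEvenSum_append (a b : List Int) : pvEvenSum (a ++ b) = pvEvenSum a + pvEvenSum b := by
  induction a with
  | nil => simp [pvEvenSum]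
  | cons v r ih =>
    simp only [pvEvenSum, List.cons_append, List.foldr_cons] at *
    rw [ih]; split_ifs <;> ring

theorem pvMaxF_append (a b : List Int) : pvMaxF (a ++ b) = max (pvMaxF a) (pvMaxF b) := by
  induction a with
  | nil =>
    simp only [List.nil_append]
    exact (max_eq_right (pvMaxF_nonneg b)).symm
  | cons v r ih =>
    simp only [pvMaxF, List.cons_append, List.foldr_cons] at ih ⊢
    rw [ih]
    simp only [max_def]; split_ifs <;> omega

theorem pvRowsES_append (a b : List (List Int)) : pvRowsES (a ++ b) = pvRowsES a + pvRowsES b := by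
  induction a with
  | nil => simp [pvRowsES]
  | cons r rs ih =>
    simp only [pvRowsES, List.cons_append, List.foldr_cons] at *; rw [ih]; ring

theorem pvRowsMF_append (a b : List (List Int)) : pvRowsMF (a ++ b) = max (pvRowsMF a) (pvRowsMF b) := by
  induction a with
  | nil =>
    simp only [List.nil_append]
    exact (max_eq_right (pvRowsMF_nonneg b)).symm
  | cons r rs ih =>
    simp only [pvRowsMF, List.cons_append, List.foldr_cons] at ih ⊢
    rw [ih]
    simp only [max_def]; split_ifs <;> omega

theorem pvCol3_append (a b : List (List Int)) : pvCol3 (a ++ b) = pvCol3 a + pvCol3 b := by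
  induction a with
  | nil => simp [pvCol3]
  | cons r rs ih =>
    simp only [pvCol3, List.cons_append, List.foldr_cons] at *; rw [ih]; ring

-- B's divide-and-conquer matches the canonical characterisations
theorem pvRowDC_eq (vals : List Int) : pvRowDC vals = (pvEvenSum vals, pvMaxF vals) := by
  induction vals using pvRowDC.induct with
  | case1 => simp [pvRowDC, pvEvenSum, pvMaxF]
  | case2 v =>
    simp only [pvRowDC, pvEvenSum, pvMaxF, List.foldr_cons, List.foldr_nil, Prod.mk.injEq]
    refine ⟨?_, ?_⟩
    · split_ifs <;> ring
    · simp only [max_def]; split_ifs <;> omega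
  | case3 v₁ v₂ rest l m ih1 ih2 =>
    have e1 : pvRowDC ((v₁ :: v₂ :: rest).take ((v₁ :: v₂ :: rest).length / 2)) =
        (pvEvenSum ((v₁ :: v₂ :: rest).take ((v₁ :: v₂ :: rest).length / 2)),
         pvMaxF ((v₁ :: v₂ :: rest).take ((v₁ :: v₂ :: rest).length / 2))) := ih1
    have e2 : pvRowDC ((v₁ :: v₂ :: rest).drop ((v₁ :: v₂ :: rest).length / 2)) =
        (pvEvenSum ((v₁ :: v₂ :: rest).drop ((v₁ :: v₂ :: rest).length / 2)),
         pvMaxF ((v₁ :: v₂ :: rest).drop ((v₁ :: v₂ :: rest).length / 2))) := ih2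
    rw [pvRowDC]
    simp only [e1, e2, Prod.mk.injEq]
    have h := List.take_append_drop ((v₁ :: v₂ :: rest).length / 2) (v₁ :: v₂ :: rest)
    refine ⟨?_, ?_⟩
    · rw [← congrArg pvEvenSum h, pvEvenSum_append]
    · rw [← congrArg pvMaxF h, pvMaxF_append]
      simp only [max_def]; split_ifs <;> omega

theorem pvAggDC_eq (rows : List (List Int)) :
    pvAggDC rows = (pvRowsES rows, pvRowsMF rows, pvCol3 rows) := by
  induction rows using pvAggDC.induct with
  | case1 => simp [pvAggDC, pvRowsES, pvRowsMF, pvCol3]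
  | case2 r =>
    simp only [pvAggDC, pvRowDC_eq, pvRowsES, pvRowsMF, pvCol3, List.foldr_cons, List.foldr_nil,
      Prod.mk.injEq]
    refine ⟨by ring, ?_, by ring⟩
    exact (max_eq_left (pvMaxF_nonneg r)).symm
  | case3 r₁ r₂ rest l m ih1 ih2 =>
    have e1 : pvAggDC ((r₁ :: r₂ :: rest).take ((r₁ :: r₂ :: rest).length / 2)) =
        (pvRowsES ((r₁ :: r₂ :: rest).take ((r₁ :: r₂ :: rest).length / 2)),
         pvRowsMF ((r₁ :: r₂ :: rest).take ((r₁ :: r₂ :: rest).length / 2)),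
         pvCol3 ((r₁ :: r₂ :: rest).take ((r₁ :: r₂ :: rest).length / 2))) := ih1
    have e2 : pvAggDC ((r₁ :: r₂ :: rest).drop ((r₁ :: r₂ :: rest).length / 2)) =
        (pvRowsES ((r₁ :: r₂ :: rest).drop ((r₁ :: r₂ :: rest).length / 2)),
         pvRowsMF ((r₁ :: r₂ :: rest).drop ((r₁ :: r₂ :: rest).length / 2)),
         pvCol3 ((r₁ :: r₂ :: rest).drop ((r₁ :: r₂ :: rest).length / 2))) := ih2
    rw [pvAggDC]
    simp only [e1, e2, Prod.mk.injEq]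
    have h := List.take_append_drop ((r₁ :: r₂ :: rest).length / 2) (r₁ :: r₂ :: rest)
    refine ⟨?_, ?_, ?_⟩
    · rw [← congrArg pvRowsES h, pvRowsES_append]
    · rw [← congrArg pvRowsMF h, pvRowsMF_append]
      simp only [max_def]; split_ifs <;> omega
    · rw [← congrArg pvCol3 h, pvCol3_append]

-- A's inner loop matches the canonical characterisations
theorem inner_loop_eq (l : List Int) (sp mv : Int) (hmv : 0 ≤ mv) :
    l.foldl (fun (s : Int × Int) valor =>
        (if PySem.Int.mod valor 2 = 0 then s.1 + valor else s.1,
         if valor > s.2 then valor else s.2)) (sp, mv)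
    = (sp + pvEvenSum l, max mv (pvMaxF l)) := by
  induction l generalizing sp mv with
  | nil =>
    simp only [List.foldl_nil, pvEvenSum, pvMaxF, List.foldr_nil, Prod.mk.injEq]
    exact ⟨by ring, (max_eq_left hmv).symm⟩
  | cons v r ih =>
    simp only [List.foldl_cons, pvEvenSum, pvMaxF, List.foldr_cons]
    rw [ih _ _ (by split_ifs <;> omega)]
    have hr := pvMaxF_nonneg r
    simp only [Prod.mk.injEq]
    refine ⟨?_, ?_⟩
    · simp only [pvEvenSum]; split_ifs <;> ring
    · simp only [pvMaxF, max_def]; split_ifs <;> omega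

-- A's outer loop matches the canonical characterisations
theorem outer_loop_eq (rows : List (List Int)) (sp mv c3 : Int) (hmv : 0 ≤ mv) :
    rows.foldl (fun (st : Int × Int × Int) linha =>
        let st2 := linha.foldl (fun (s : Int × Int) valor =>
            (if PySem.Int.mod valor 2 = 0 then s.1 + valor else s.1,
             if valor > s.2 then valor else s.2)) (st.1, st.2.1)
        (st2.1, st2.2,
         if (3 : Int) ≤ (linha.length : Int) then st.2.2 + ((PySem.List.pyGet? linha 2).getD 0) else st.2.2))
      (sp, mv, c3)
    = (sp + pvRowsES rows, max mv (pvRowsMF rows), c3 + pvCol3 rows) := by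
  induction rows generalizing sp mv c3 with
  | nil =>
    simp only [List.foldl_nil, pvRowsES, pvRowsMF, pvCol3, List.foldr_nil, Prod.mk.injEq]
    exact ⟨by ring, (max_eq_left hmv).symm, by ring⟩
  | cons r rs ih =>
    simp only [List.foldl_cons, inner_loop_eq r sp mv hmv]
    have hr := pvMaxF_nonneg r
    have hrs := pvRowsMF_nonneg rs
    rw [ih _ _ _ (le_max_of_le_left hmv)]
    simp only [pvRowsES, pvRowsMF, pvCol3, List.foldr_cons, Prod.mk.injEq]
    refine ⟨by ring, ?_, ?_⟩
    · simp only [max_def]; split_ifs <;> omega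
    · split_ifs <;> ring

-- ===== VERDICT (by name: the statement is the Claim_ definition above) =====
theorem analisa_matriz_spec : Claim_equal_analisa_matriz := by
  intro matriz _ _
  unfold Spec_analisa_matriz analisa_matriz analisa_matriz_alt
  rw [outer_loop_eq matriz 0 0 0 le_rfl, pvAggDC_eq]
  have := pvRowsMF_nonneg matriz
  simp only [zero_add]
  rw [max_eq_right this]
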